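-- pv_equiv track=rewrite | github.com/KMoszczyc/Prison-Database | PrisonFillerMySQL/scripts.py | random_shifts
-- ===== SOURCE A (Python) =====
-- def random_shifts(max_jailers_per_duty,duties, min_duty_id,jailers,min_jailer_id):
--     shifts=[]
--     jailer_index=0
--     last_jailer_index=0;
--     for i in range(len(duties)):
--         for j in range(max_jailers_per_duty):
--             for z in range(jailer_index,len(jailers)):
--                 (_,_,_,_,layoff_date) = jailers[z]
--                 if layoff_date==None:
--                     shifts.append((i + min_duty_id, z + min_jailer_id))
--                     last_jailer_index=z
--                     break
--
--             jailer_index = last_jailer_index + 1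
--             if jailer_index>=len(jailers)-1:
--                 jailer_index=0
--
--     return shifts
-- ===== SOURCE B (Python) =====
-- def random_shifts(max_jailers_per_duty, duties, min_duty_id, jailers, min_jailer_id):
--     n = len(jailers)
--     # next-active table: nxt[k] = smallest z >= k with layoff_date None, else n
--     nxt = [n] * (n + 1)
--     for k in range(n - 1, -1, -1):
--         nxt[k] = k if jailers[k][4] is None else nxt[k + 1]
--     m = max(max_jailers_per_duty, 0)
--     # one flat pass over all duty slots, recording which jailer (if any) each slot picks
--     picks = []
--     ji = 0
--     last = 0
--     for _ in range(len(duties) * m):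
--         z = nxt[ji]
--         if z < n:
--             picks.append(z)
--             last = z
--         else:
--             picks.append(None)
--         ji = last + 1
--         if ji >= n - 1:
--             ji = 0
--     # pair each slot with its duty id and keep the filled ones
--     duty_ids = [i + min_duty_id for i in range(len(duties)) for _ in range(m)]
--     return [(d, z + min_jailer_id) for d, z in zip(duty_ids, picks) if z is not None]
-- ===== Notes on version B (the rewrite author's own statement) =====
-- stated objective: alternative
-- what changed: B precomputes a next-active-jailer index table (removing A's per-slot linear rescan of the jailer list) and replaces A's three nested loops by staged passes: one flat loop over all duty slots recording each slot's picked jailer index, then a zip with a precomputed duty-id list to build the output; O(J + D*M) work per slot bookkeeping vs A's O(D*M*J) worst case, but a timing run did not confirm a 1.5x win on the generated inputs, so no speed is claimed.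
import Mathlib
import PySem

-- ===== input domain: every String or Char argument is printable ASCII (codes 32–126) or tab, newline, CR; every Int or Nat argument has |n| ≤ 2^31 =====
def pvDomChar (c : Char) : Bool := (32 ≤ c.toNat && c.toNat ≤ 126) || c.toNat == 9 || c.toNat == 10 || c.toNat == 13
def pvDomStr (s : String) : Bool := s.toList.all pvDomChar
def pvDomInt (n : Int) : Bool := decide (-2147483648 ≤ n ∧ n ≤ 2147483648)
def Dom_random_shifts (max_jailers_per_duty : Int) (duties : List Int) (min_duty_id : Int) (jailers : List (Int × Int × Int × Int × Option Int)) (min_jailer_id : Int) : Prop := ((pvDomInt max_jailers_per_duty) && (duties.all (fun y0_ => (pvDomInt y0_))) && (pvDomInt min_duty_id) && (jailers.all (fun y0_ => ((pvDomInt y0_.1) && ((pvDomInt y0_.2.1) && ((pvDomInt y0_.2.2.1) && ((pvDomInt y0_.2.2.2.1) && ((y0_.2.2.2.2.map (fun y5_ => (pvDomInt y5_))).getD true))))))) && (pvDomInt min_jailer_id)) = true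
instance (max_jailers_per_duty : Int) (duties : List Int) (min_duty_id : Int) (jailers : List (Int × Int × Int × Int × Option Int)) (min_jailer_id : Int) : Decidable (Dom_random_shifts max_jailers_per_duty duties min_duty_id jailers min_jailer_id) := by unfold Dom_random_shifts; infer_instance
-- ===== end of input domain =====

-- B replaces A's three nested loops (with a per-slot rescan of the jailer list) by a precomputed
-- next-active-jailer table, one flat pass over all duty slots recording each slot's pick, and a
-- final zip with a precomputed duty-id list (alternative algorithm; return value proved identical).

-- ===== PORT A =====

-- inner 'for z in range(jailer_index, len(jailers)): … break' loop of A: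
-- returns the first index z ≥ start with layoff_date == None, else none
def pvScanA (jailers : List (Int × Int × Int × Int × Option Int)) (z : Nat) : Option Nat :=
  if h : z < jailers.length then
    if (jailers[z]).2.2.2.2 = none then some z else pvScanA jailers (z + 1)
  else none
termination_by jailers.length - z

-- body of A's 'for j in range(max_jailers_per_duty)' loop; state = (shifts, jailer_index, last_jailer_index)
def pvStepA (jailers : List (Int × Int × Int × Int × Option Int)) (iv mji : Int)
    (st : List (Int × Int) × Nat × Nat) : List (Int × Int) × Nat × Nat :=
  let (shifts, ji, last) := st
  let (shifts, last) :=
    match pvScanA jailers ji with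
    | some z => (shifts ++ [(iv, (z : Int) + mji)], z)
    | none => (shifts, last)
  let ji := last + 1
  let ji := if jailers.length - 1 ≤ ji then 0 else ji
  (shifts, ji, last)

def random_shifts (max_jailers_per_duty : Int) (duties : List Int) (min_duty_id : Int) (jailers : List (Int × Int × Int × Int × Option Int)) (min_jailer_id : Int) : List (Int × Int) :=
  ((List.range duties.length).foldl (fun st i =>
      (PySem.List.pyRange 0 max_jailers_per_duty 1).foldl
        (fun st _ => pvStepA jailers (Int.ofNat i + min_duty_id) min_jailer_id st) st)
    ([], 0, 0)).1

-- ===== PORT B =====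

-- the table nxt of Source B (built back-to-front): nxt[k] = first active index ≥ k, else n; length n+1
def pvBuildNxt (jailers : List (Int × Int × Int × Int × Option Int)) (off : Nat) : List Nat :=
  match jailers with
  | [] => [off]
  | j :: rest =>
    let tail := pvBuildNxt rest (off + 1)
    (if j.2.2.2.2 = none then off else match tail with | t :: _ => t | [] => off) :: tail

-- body of Source B's single flat loop: records this slot's pick and advances (ji, last)
def pvNext (nxt : List Nat) (n : Nat) (st : Nat × Nat) : Option Nat × Nat × Nat :=
  let z := nxt.getD st.1 n
  let (o, last) := if z < n then (some z, z) else (none, st.2)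
  let ji := last + 1
  let ji := if n - 1 ≤ ji then 0 else ji
  (o, ji, last)

def random_shifts_alt (max_jailers_per_duty : Int) (duties : List Int) (min_duty_id : Int) (jailers : List (Int × Int × Int × Int × Option Int)) (min_jailer_id : Int) : List (Int × Int) :=
  let n := jailers.length
  let nxt := pvBuildNxt jailers 0
  let m := (max max_jailers_per_duty 0).toNat
  let res := (List.range (duties.length * m)).foldl
      (fun (st : List (Option Nat) × Nat × Nat) _ =>
        let (o, st') := pvNext nxt n st.2
        (st.1 ++ [o], st')) ([], 0, 0)
  let dutyIds := (List.range duties.length).flatMap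
      (fun i => List.replicate m (Int.ofNat i + min_duty_id))
  (dutyIds.zip res.1).filterMap (fun p => p.2.map (fun z => (p.1, (z : Int) + min_jailer_id)))

-- ===== PRECONDITION & SPEC =====
def Spec_random_shifts (max_jailers_per_duty : Int) (duties : List Int) (min_duty_id : Int) (jailers : List (Int × Int × Int × Int × Option Int)) (min_jailer_id : Int) (out : List (Int × Int)) : Prop := out = random_shifts_alt max_jailers_per_duty duties min_duty_id jailers min_jailer_id
instance (max_jailers_per_duty : Int) (duties : List Int) (min_duty_id : Int) (jailers : List (Int × Int × Int × Int × Option Int)) (min_jailer_id : Int) (out : List (Int × Int)) : Decidable (Spec_random_shifts max_jailers_per_duty duties min_duty_id jailers min_jailer_id out) := by unfold Spec_random_shifts; infer_instance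

-- ===== CLAIM (what is proved, stated in full; the proofs are below) =====
def Claim_equal_random_shifts : Prop := ∀ (max_jailers_per_duty : Int) (duties : List Int) (min_duty_id : Int) (jailers : List (Int × Int × Int × Int × Option Int)) (min_jailer_id : Int), Dom_random_shifts max_jailers_per_duty duties min_duty_id jailers min_jailer_id → Spec_random_shifts max_jailers_per_duty duties min_duty_id jailers min_jailer_id (random_shifts max_jailers_per_duty duties min_duty_id jailers min_jailer_id)

-- ===== LEMMAS AND PROOFS =====

-- index of the first active jailer in a list (or its length if none): closed form linking both ports
def pvNxtv (jailers : List (Int × Int × Int × Int × Option Int)) : Nat :=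
  match jailers with
  | [] => 0
  | j :: rest => if j.2.2.2.2 = none then 0 else pvNxtv rest + 1

theorem pvBuildNxt_ne_nil (js : List (Int × Int × Int × Int × Option Int)) (off : Nat) :
    pvBuildNxt js off ≠ [] := by
  cases js <;> simp [pvBuildNxt]

theorem pvBuildNxt_getD (js : List (Int × Int × Int × Int × Option Int)) (off k d : Nat)
    (hk : k ≤ js.length) :
    (pvBuildNxt js off).getD k d = off + k + pvNxtv (js.drop k) := by
  induction js generalizing off k with
  | nil =>
    have : k = 0 := by simpa using hk
    subst this
    simp [pvBuildNxt, pvNxtv]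
  | cons j rest ih =>
    cases k with
    | zero =>
      by_cases hj : j.2.2.2.2 = none
      · simp [pvBuildNxt, hj, pvNxtv]
      · have h0 := ih (off + 1) 0 (Nat.zero_le _)
        rcases h : pvBuildNxt rest (off + 1) with _ | ⟨t, ts⟩
        · exact absurd h (pvBuildNxt_ne_nil rest (off + 1))
        · rw [h] at h0
          simp only [List.getD, List.getElem?_cons_zero, Option.getD_some, List.drop_zero] at h0
          simp only [pvBuildNxt, hj, if_false, h, List.getD, List.getElem?_cons_zero,
            Option.getD_some, List.drop_zero, pvNxtv]
          omega
    | succ k =>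
      have hk' : k ≤ rest.length := by simpa using hk
      have h1 := ih (off + 1) k hk'
      have hstep : (pvBuildNxt (j :: rest) off).getD (k + 1) d =
          (pvBuildNxt rest (off + 1)).getD k d := by
        simp only [pvBuildNxt, List.getD_cons_succ]
      rw [hstep, h1]
      have hdrop : (j :: rest).drop (k + 1) = rest.drop k := rfl
      rw [hdrop]
      omega

theorem pvScanA_eq (js : List (Int × Int × Int × Int × Option Int)) (z : Nat) :
    pvScanA js z =
      if z + pvNxtv (js.drop z) < js.length then some (z + pvNxtv (js.drop z)) else none := by
  by_cases h : z < js.length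
  · have hd : js.drop z = js[z] :: js.drop (z + 1) := List.drop_eq_getElem_cons h
    by_cases hj : (js[z]).2.2.2.2 = none
    · rw [pvScanA]
      rw [hd]
      simp only [pvNxtv, hj, if_true, Nat.add_zero]
      simp [h]
    · have ih := pvScanA_eq js (z + 1)
      rw [pvScanA]
      simp only [h, dite_true, hj, if_false, ih, hd, pvNxtv]
      have : z + (pvNxtv (js.drop (z + 1)) + 1) = z + 1 + pvNxtv (js.drop (z + 1)) := by omega
      simp [this]
  · have hz : js.length ≤ z := Nat.le_of_not_lt h
    rw [pvScanA]
    simp [h]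
    omega
termination_by js.length - z

-- loop invariant on the index state (jailer_index, last_jailer_index)
def pvInv (n : Nat) (st : Nat × Nat) : Prop :=
  st.1 ≤ n ∧ (st.2 < n ∨ st.2 = 0)

-- m iterations of Source B's flat loop body, collecting the per-slot picks
def pvRun (nxt : List Nat) (n : Nat) : Nat → (Nat × Nat) → List (Option Nat) × (Nat × Nat)
  | 0, st => ([], st)
  | m + 1, st =>
    let r := pvNext nxt n st
    let rest := pvRun nxt n m r.2
    (r.1 :: rest.1, rest.2)

-- rendering of one duty's picks into shift pairs
def pvRender (iv mji : Int) (ops : List (Option Nat)) : List (Int × Int) :=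
  ops.filterMap (fun o => o.map (fun z => (iv, (z : Int) + mji)))

theorem pvRun_length (nxt : List Nat) (n m : Nat) (st : Nat × Nat) :
    (pvRun nxt n m st).1.length = m := by
  induction m generalizing st with
  | zero => rfl
  | succ m ih => simp [pvRun, ih]

theorem pvRun_add (nxt : List Nat) (n a b : Nat) (st : Nat × Nat) :
    pvRun nxt n (a + b) st =
      ((pvRun nxt n a st).1 ++ (pvRun nxt n b (pvRun nxt n a st).2).1,
        (pvRun nxt n b (pvRun nxt n a st).2).2) := by
  induction a generalizing st with
  | zero => simp [pvRun]
  | succ a ih =>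
    have : a + 1 + b = (a + b) + 1 := by omega
    rw [this]
    simp only [pvRun, ih, List.cons_append]

-- one step of A equals one pvNext step (under the invariant), and the invariant is preserved
theorem pvStepA_eq (js : List (Int × Int × Int × Int × Option Int)) (iv mji : Int)
    (sh : List (Int × Int)) (st : Nat × Nat) (hst : pvInv js.length st) :
    pvStepA js iv mji (sh, st) =
      (sh ++ pvRender iv mji [(pvNext (pvBuildNxt js 0) js.length st).1],
        (pvNext (pvBuildNxt js 0) js.length st).2) ∧
      pvInv js.length (pvNext (pvBuildNxt js 0) js.length st).2 := by
  obtain ⟨ji, last⟩ := st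
  obtain ⟨hji, hlast⟩ := hst
  simp only at hji hlast
  have hg : (pvBuildNxt js 0).getD ji js.length = ji + pvNxtv (js.drop ji) :=
    by simpa using pvBuildNxt_getD js 0 ji js.length hji
  have hs := pvScanA_eq js ji
  set Z := ji + pvNxtv (js.drop ji) with hZ
  have hg' : (pvBuildNxt js 0)[ji]?.getD js.length = Z := by
    simpa [List.getD] using hg
  by_cases hlt : Z < js.length
  · have hN : pvNext (pvBuildNxt js 0) js.length (ji, last) =
        (some Z, (if js.length - 1 ≤ Z + 1 then 0 else Z + 1), Z) := by
      simp [pvNext, hg', hlt]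
    refine ⟨?_, ?_⟩
    · rw [hN]
      simp [pvStepA, hs, hlt, pvRender]
    · rw [hN]
      refine ⟨?_, Or.inl hlt⟩
      simp only
      split <;> omega
  · have hN : pvNext (pvBuildNxt js 0) js.length (ji, last) =
        (none, (if js.length - 1 ≤ last + 1 then 0 else last + 1), last) := by
      simp [pvNext, hg', hlt]
    refine ⟨?_, ?_⟩
    · rw [hN]
      simp [pvStepA, hs, hlt, pvRender]
    · rw [hN]
      refine ⟨?_, hlast⟩
      simp only
      split <;> omega

-- A's inner duty loop (over any index list) = pvRun of its length, rendered
theorem pvFoldA (js : List (Int × Int × Int × Int × Option Int)) (iv mji : Int)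
    (L : List Int) (sh : List (Int × Int)) (st : Nat × Nat) (hst : pvInv js.length st) :
    L.foldl (fun s _ => pvStepA js iv mji s) (sh, st) =
      (sh ++ pvRender iv mji (pvRun (pvBuildNxt js 0) js.length L.length st).1,
        (pvRun (pvBuildNxt js 0) js.length L.length st).2) ∧
      pvInv js.length (pvRun (pvBuildNxt js 0) js.length L.length st).2 := by
  induction L generalizing sh st with
  | nil => exact ⟨by simp [pvRun, pvRender], hst⟩
  | cons x xs ih =>
    obtain ⟨heq, hinv⟩ := pvStepA_eq js iv mji sh st hst
    obtain ⟨ih1, ih2⟩ := ih (sh ++ pvRender iv mji [(pvNext (pvBuildNxt js 0) js.length st).1])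
      (pvNext (pvBuildNxt js 0) js.length st).2 hinv
    constructor
    · simp only [List.foldl_cons, heq, ih1, pvRun, List.length_cons]
      simp [pvRender, ← List.filterMap_append]
    · simpa [pvRun] using ih2

-- Source B's flat loop (over any list) accumulates exactly pvRun of its length
theorem pvFoldB (nxt : List Nat) (n : Nat) (L : List Nat) (ps : List (Option Nat)) (st : Nat × Nat) :
    L.foldl (fun (s : List (Option Nat) × Nat × Nat) _ =>
        let r := pvNext nxt n s.2
        (s.1 ++ [r.1], r.2)) (ps, st) =
      (ps ++ (pvRun nxt n L.length st).1, (pvRun nxt n L.length st).2) := by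
  induction L generalizing ps st with
  | nil => simp [pvRun]
  | cons x xs ih =>
    simp only [List.foldl_cons, ih, pvRun, List.length_cons]
    simp

-- zipping a constant duty id over one duty's picks renders that duty
theorem pvZipReplicate (c mji : Int) (ops : List (Option Nat)) :
    (List.zip (List.replicate ops.length c) ops).filterMap
        (fun p => p.2.map (fun z => (p.1, (z : Int) + mji))) = pvRender c mji ops := by
  induction ops with
  | nil => rfl
  | cons o os ih =>
    cases o <;> simp_all [List.replicate_succ, pvRender]

-- the main correspondence: A's nested fold = B's zip-and-filter of the flat run
theorem pvMain (js : List (Int × Int × Int × Int × Option Int)) (M mdi mji : Int)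
    (L : List Nat) (sh : List (Int × Int)) (st : Nat × Nat) (hst : pvInv js.length st) :
    (L.foldl (fun s i =>
        (PySem.List.pyRange 0 M 1).foldl
          (fun s _ => pvStepA js (Int.ofNat i + mdi) mji s) s) (sh, st)).1 =
      sh ++ ((L.flatMap (fun i => List.replicate M.toNat (Int.ofNat i + mdi))).zip
          (pvRun (pvBuildNxt js 0) js.length (L.length * M.toNat) st).1).filterMap
        (fun p => p.2.map (fun z => (p.1, (z : Int) + mji))) := by
  induction L generalizing sh st with
  | nil => simp
  | cons i L ih =>
    have hm : (PySem.List.pyRange 0 M 1).length = M.toNat := by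
      rw [PySem.List.length_pyRange_one]; omega
    obtain ⟨h1, h2⟩ := pvFoldA js (Int.ofNat i + mdi) mji (PySem.List.pyRange 0 M 1) sh st hst
    rw [List.foldl_cons, h1, ih _ _ h2]
    have hsplit : (i :: L).length * M.toNat = M.toNat + L.length * M.toNat := by
      simp [List.length_cons]; ring
    rw [hsplit, pvRun_add]
    rw [hm]
    set r1 := pvRun (pvBuildNxt js 0) js.length M.toNat st with hr1
    have hlen1 : (List.replicate M.toNat (Int.ofNat i + mdi)).length = r1.1.length := by
      simp [hr1, pvRun_length]
    rw [List.flatMap_cons, List.zip_append hlen1, List.filterMap_append]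
    have : (List.replicate M.toNat (Int.ofNat i + mdi)) = List.replicate r1.1.length (Int.ofNat i + mdi) := by
      rw [hlen1.symm] at *
      simp
    rw [this, pvZipReplicate]
    simp [List.append_assoc]

-- ===== VERDICT (by name: the statement is the Claim_ definition above) =====
theorem random_shifts_spec : Claim_equal_random_shifts := by
  intro M duties mdi js mji _
  unfold Spec_random_shifts random_shifts random_shifts_alt
  simp only []
  have hmax : (max M 0).toNat = M.toNat := by omega
  have hinv : pvInv js.length (0, 0) := ⟨Nat.zero_le _, Or.inr rfl⟩
  have hB := pvFoldB (pvBuildNxt js 0) js.length (List.range (duties.length * (max M 0).toNat))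
    [] (0, 0)
  have hA := pvMain js M mdi mji (List.range duties.length) [] (0, 0) hinv
  rw [hA]
  rw [hB]
  simp [hmax, List.length_range]
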